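-- pv_equiv track=rewrite | github.com/microsoft/ReACC | process_python.py | convert_to_normal
-- ===== SOURCE A (Python) =====
-- def convert_to_normal(code):
--     lines = code.split("<endofline>")
--     indent_size = 4
--     indent = 0
--     res = ""
--     for line in lines:
--         indent += line.count("<INDENT>")
--         indent -= line.count("<DEDENT>")
--         res += "\n" + " "*indent_size*indent + line.replace("<INDENT>", "").replace("<DEDENT>", "")
--     return res
-- ===== SOURCE B (Python) =====
-- def convert_to_normal(code):
--     out = []
--     buf = []
--     indent = 0
--     delta = 0
--     i = 0
--     n = len(code)
--     while i < n:
--         if code.startswith("<endofline>", i):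
--             indent += delta
--             out.append("\n" + " " * 4 * indent + "".join(buf))
--             buf = []
--             delta = 0
--             i += 11
--         elif code.startswith("<INDENT>", i):
--             delta += 1
--             i += 8
--         elif code.startswith("<DEDENT>", i):
--             delta -= 1
--             i += 8
--         else:
--             buf.append(code[i])
--             i += 1
--     indent += delta
--     out.append("\n" + " " * 4 * indent + "".join(buf))
--     return "".join(out)
-- ===== Notes on version B (the rewrite author's own statement) =====
-- stated objective: alternative
-- what changed: Replaces A's split-into-lines plus per-line count/count/replace/replace passes with a single left-to-right tokenizing state machine over the raw string that recognises the three tokens in one scan, flushing a line buffer at each end-of-line token; correct because every token begins with an opening angle bracket, ends with a closing one and has none inside, so token occurrences never overlap.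
-- intended difference: On inputs where deleting a line's INDENT tokens splices the surrounding text into a new DEDENT-token-shaped substring, A's second replace pass silently deletes that spliced text too, while B keeps it; B is intended since that text is not a DEDENT token of the input (at the witness, A returns a newline plus four spaces, B additionally keeps the spliced text). — e.g. on convert_to_normal("<DED<INDENT>ENT>"): A returns "\n ", B returns "\n <DEDENT>"
import Mathlib
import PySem

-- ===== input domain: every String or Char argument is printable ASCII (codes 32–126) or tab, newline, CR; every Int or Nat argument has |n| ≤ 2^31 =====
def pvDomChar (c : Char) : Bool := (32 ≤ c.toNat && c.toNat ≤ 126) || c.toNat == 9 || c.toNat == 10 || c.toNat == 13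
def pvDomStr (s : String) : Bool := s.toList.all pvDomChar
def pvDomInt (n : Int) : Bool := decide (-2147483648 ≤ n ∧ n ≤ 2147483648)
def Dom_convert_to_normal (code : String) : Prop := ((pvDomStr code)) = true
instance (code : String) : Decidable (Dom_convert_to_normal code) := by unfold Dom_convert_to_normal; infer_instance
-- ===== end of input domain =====

-- B replaces A's split + per-line count/count/replace/replace passes by a single left-to-right
-- tokenizing state machine over the raw string; objective: alternative decomposition, no speed claim.

-- ===== PORT A =====
-- A: split on the end-of-line token, then one loop carrying (indent, res); each line appends a newline, the indentation and the stripped line.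
def convert_to_normal (code : String) : String :=
  let lines := PySem.Chars.splitOn code.toList "<endofline>".toList
  let indentSize : Int := 4
  let st := lines.foldl
    (fun (st : Int × List Char) line =>
      let indent := st.1 + (PySem.Chars.count line "<INDENT>".toList : Int)
                        - (PySem.Chars.count line "<DEDENT>".toList : Int)
      (indent,
        st.2 ++ '\n' :: (List.replicate (indentSize * indent).toNat ' '
          ++ PySem.Chars.replace (PySem.Chars.replace line "<INDENT>".toList []) "<DEDENT>".toList [])))
    ((0 : Int), ([] : List Char))
  String.ofList st.2

-- ===== PORT B =====
-- B: one scan over the characters with state (indent, delta, line buffer, output), recognising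
-- the three tokens by startswith at the current position; flush at the end-of-line token and at the end.
def pvPiece (lvl : Int) (buf : List Char) : List Char :=
  '\n' :: (List.replicate (4 * lvl).toNat ' ' ++ buf)

def pvLoopB : List Char → Int → Int → List Char → List Char → List Char
  | [], indent, delta, buf, out => out ++ pvPiece (indent + delta) buf
  | c :: t, indent, delta, buf, out =>
    if PySem.Chars.startswith (c :: t) "<endofline>".toList then
      pvLoopB (t.drop 10) (indent + delta) 0 [] (out ++ pvPiece (indent + delta) buf)
    else if PySem.Chars.startswith (c :: t) "<INDENT>".toList then
      pvLoopB (t.drop 7) indent (delta + 1) buf out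
    else if PySem.Chars.startswith (c :: t) "<DEDENT>".toList then
      pvLoopB (t.drop 7) indent (delta - 1) buf out
    else
      pvLoopB t indent delta (buf ++ [c]) out
termination_by l => l.length
decreasing_by all_goals (simp [List.length_drop]; try omega)

def convert_to_normal_alt (code : String) : String :=
  String.ofList (pvLoopB code.toList 0 0 [] [])

-- ===== PRECONDITION & SPEC =====
-- On inputs where deleting a line's INDENT tokens splices the surrounding text into a NEW
-- DEDENT-token-shaped substring, A's second replace pass silently deletes that spliced text too,
-- while B keeps it — intended, since that text is not a DEDENT token of the input.
def D_convert_to_normal (code : String) : Prop :=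
  ∃ l ∈ PySem.Chars.splitOn code.toList "<endofline>".toList,
    PySem.Chars.count (PySem.Chars.replace l "<INDENT>".toList []) "<DEDENT>".toList
      ≠ PySem.Chars.count l "<DEDENT>".toList
instance (code : String) : Decidable (D_convert_to_normal code) := by
  unfold D_convert_to_normal; infer_instance

def Spec_convert_to_normal (code : String) (out : String) : Prop :=
  ¬ D_convert_to_normal code → out = convert_to_normal_alt code
instance (code : String) (out : String) : Decidable (Spec_convert_to_normal code out) := by
  unfold Spec_convert_to_normal; infer_instance

def pvDiffWitness_convert_to_normal : String := "<DED<INDENT>ENT>"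
def pvDiffWitnessOut_convert_to_normal : String × String := ("\n    ", "\n    <DEDENT>")

-- ===== CLAIM (what is proved, stated in full; the proofs are below) =====
def Claim_unchanged_convert_to_normal : Prop := ∀ (code : String), Dom_convert_to_normal code → Spec_convert_to_normal code (convert_to_normal code)
def Claim_changed_convert_to_normal : Prop := Dom_convert_to_normal (pvDiffWitness_convert_to_normal) ∧ D_convert_to_normal (pvDiffWitness_convert_to_normal) ∧ convert_to_normal (pvDiffWitness_convert_to_normal) = pvDiffWitnessOut_convert_to_normal.1 ∧ convert_to_normal_alt (pvDiffWitness_convert_to_normal) = pvDiffWitnessOut_convert_to_normal.2 ∧ pvDiffWitnessOut_convert_to_normal.1 ≠ pvDiffWitnessOut_convert_to_normal.2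
def Claim_exact_convert_to_normal : Prop := ∀ (code : String), Dom_convert_to_normal code → D_convert_to_normal code → convert_to_normal code ≠ convert_to_normal_alt code

-- ===== LEMMAS AND PROOFS =====

-- The three tokens as explicit character lists.
def tE : List Char := ['<','e','n','d','o','f','l','i','n','e','>']
def tI : List Char := ['<','I','N','D','E','N','T','>']
def tD : List Char := ['<','D','E','D','E','N','T','>']

lemma tE_eq : "<endofline>".toList = tE := rfl
lemma tI_eq : "<INDENT>".toList = tI := rfl
lemma tD_eq : "<DEDENT>".toList = tD := rfl

-- Fuel-free spec versions of str.count(sub), str.replace(sub, "") and str.split("<endofline>").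
def cnt (sub : List Char) : List Char → Nat
  | [] => 0
  | c :: t => if sub.isPrefixOf (c :: t) then 1 + cnt sub (t.drop (sub.length - 1)) else cnt sub t
termination_by l => l.length
decreasing_by all_goals (simp [List.length_drop]; try omega)

def rep (sub : List Char) : List Char → List Char
  | [] => []
  | c :: t => if sub.isPrefixOf (c :: t) then rep sub (t.drop (sub.length - 1)) else c :: rep sub t
termination_by l => l.length
decreasing_by all_goals (simp [List.length_drop]; try omega)

def spl : List Char → List Char × List (List Char)
  | [] => ([], [])
  | c :: t =>
    if tE.isPrefixOf (c :: t) then ([], (spl (t.drop 10)).1 :: (spl (t.drop 10)).2)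
    else (c :: (spl t).1, (spl t).2)
termination_by l => l.length
decreasing_by all_goals (simp [List.length_drop]; try omega)

-- B's per-line delta and text (the scanner restricted to one line).
def dB : List Char → Int
  | [] => 0
  | c :: t =>
    if tI.isPrefixOf (c :: t) then dB (t.drop 7) + 1
    else if tD.isPrefixOf (c :: t) then dB (t.drop 7) - 1
    else dB t
termination_by l => l.length
decreasing_by all_goals (simp [List.length_drop]; try omega)

def tB : List Char → List Char
  | [] => []
  | c :: t =>
    if tI.isPrefixOf (c :: t) then tB (t.drop 7)
    else if tD.isPrefixOf (c :: t) then tB (t.drop 7)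
    else c :: tB t
termination_by l => l.length
decreasing_by all_goals (simp [List.length_drop]; try omega)

-- A's per-line delta and text.
def dA (l : List Char) : Int := (cnt tI l : Int) - (cnt tD l : Int)
def tA (l : List Char) : List Char := rep tD (rep tI l)
def OKl (l : List Char) : Prop := cnt tD (rep tI l) = cnt tD l

def RA : Int → List (List Char) → List Char
  | _, [] => []
  | t, l :: ls => pvPiece (t + dA l) (tA l) ++ RA (t + dA l) ls

def RB : Int → List (List Char) → List Char
  | _, [] => []
  | t, l :: ls => pvPiece (t + dB l) (tB l) ++ RB (t + dB l) ls

-- ---- defuelling the PySem primitives ----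
lemma count_go_eq (sub : List Char) (hs : sub ≠ []) :
    ∀ n l acc, l.length ≤ n → PySem.Chars.count.go sub n l acc = acc + cnt sub l := by
  intro n
  induction n with
  | zero =>
    intro l acc h
    have hl : l = [] := List.eq_nil_of_length_eq_zero (Nat.le_zero.mp h)
    subst hl
    rw [PySem.Chars.count.go]
    simp [cnt]
  | succ n ih =>
    intro l acc h
    cases l with
    | nil => simp [PySem.Chars.count.go, cnt]
    | cons c t =>
      rw [PySem.Chars.count.go]
      by_cases hp : sub.isPrefixOf (c :: t)
      · obtain ⟨a, s, hsub⟩ := List.exists_cons_of_ne_nil hs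
        subst hsub
        rw [if_pos hp, ih _ _ (by simp at h ⊢; omega)]
        rw [show List.drop (a :: s).length (c :: t) = t.drop ((a :: s).length - 1) by simp,
            cnt, if_pos hp]
        omega
      · rw [if_neg hp, ih _ _ (by simp at h ⊢; omega), cnt, if_neg hp]

lemma count_eq_cnt (l sub : List Char) (hs : sub ≠ []) :
    PySem.Chars.count l sub = cnt sub l := by
  unfold PySem.Chars.count
  rw [if_neg (by simpa [List.isEmpty_iff] using hs)]
  simpa using count_go_eq sub hs l.length l 0 le_rfl

lemma replace_go_eq (sub : List Char) (hs : sub ≠ []) :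
    ∀ n l acc, l.length ≤ n → PySem.Chars.replace.go sub [] n l acc = acc.reverse ++ rep sub l := by
  intro n
  induction n with
  | zero =>
    intro l acc h
    have hl : l = [] := List.eq_nil_of_length_eq_zero (Nat.le_zero.mp h)
    subst hl
    rw [PySem.Chars.replace.go]
    simp [rep]
  | succ n ih =>
    intro l acc h
    cases l with
    | nil => simp [PySem.Chars.replace.go, rep]
    | cons c t =>
      rw [PySem.Chars.replace.go]
      by_cases hp : sub.isPrefixOf (c :: t)
      · obtain ⟨a, s, hsub⟩ := List.exists_cons_of_ne_nil hs
        subst hsub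
        rw [if_pos hp]
        rw [show List.reverse ([] : List Char) ++ acc = acc by simp,
            ih _ _ (by simp at h ⊢; omega),
            show List.drop (a :: s).length (c :: t) = t.drop ((a :: s).length - 1) by simp,
            rep, if_pos hp]
      · rw [if_neg hp, ih _ _ (by simp at h ⊢; omega), rep, if_neg hp]
        simp

lemma replace_eq_rep (l sub : List Char) (hs : sub ≠ []) :
    PySem.Chars.replace l sub [] = rep sub l := by
  unfold PySem.Chars.replace
  rw [if_neg (by simpa [List.isEmpty_iff] using hs)]
  simpa using replace_go_eq sub hs l.length l []

lemma splitOn_go_eq :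
    ∀ n l cur acc, l.length < n →
      PySem.Chars.splitOn.go tE n l cur acc
        = acc.reverse ++ (cur.reverse ++ (spl l).1) :: (spl l).2 := by
  intro n
  induction n with
  | zero => intro l cur acc h; omega
  | succ n ih =>
    intro l cur acc h
    cases l with
    | nil => simp [PySem.Chars.splitOn.go, spl]
    | cons c t =>
      rw [PySem.Chars.splitOn.go]
      by_cases hp : tE.isPrefixOf (c :: t)
      · rw [if_pos hp]
        have hdrop : List.drop tE.length (c :: t) = t.drop 10 := by simp [tE]
        rw [hdrop, ih _ _ _ (by simp at h ⊢; omega), spl, if_pos hp]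
        simp
      · rw [if_neg hp, ih _ _ _ (by simp at h ⊢; omega), spl, if_neg hp]
        simp

lemma splitOn_eq_spl (s : List Char) :
    PySem.Chars.splitOn s tE = (spl s).1 :: (spl s).2 := by
  unfold PySem.Chars.splitOn
  simpa using splitOn_go_eq (s.length + 1) s [] [] (by omega)

-- ---- characterisation of A ----
lemma A_loop (ls : List (List Char)) (t : Int) (res : List Char) :
    ls.foldl
      (fun (st : Int × List Char) line =>
        ((st.1 + (PySem.Chars.count line "<INDENT>".toList : Int)
              - (PySem.Chars.count line "<DEDENT>".toList : Int)),
         st.2 ++ '\n' :: (List.replicate ((4 : Int) * (st.1 + (PySem.Chars.count line "<INDENT>".toList : Int)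
              - (PySem.Chars.count line "<DEDENT>".toList : Int))).toNat ' '
          ++ PySem.Chars.replace (PySem.Chars.replace line "<INDENT>".toList []) "<DEDENT>".toList [])))
      (t, res)
    = (t + (ls.map dA).sum, res ++ RA t ls) := by
  have hI : ∀ l : List Char, PySem.Chars.count l "<INDENT>".toList = cnt tI l := by
    intro l; rw [tI_eq]; exact count_eq_cnt l tI (by simp [tI])
  have hD : ∀ l : List Char, PySem.Chars.count l "<DEDENT>".toList = cnt tD l := by
    intro l; rw [tD_eq]; exact count_eq_cnt l tD (by simp [tD])
  have hRI : ∀ l : List Char, PySem.Chars.replace l "<INDENT>".toList [] = rep tI l := by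
    intro l; rw [tI_eq]; exact replace_eq_rep l tI (by simp [tI])
  have hRD : ∀ l : List Char, PySem.Chars.replace l "<DEDENT>".toList [] = rep tD l := by
    intro l; rw [tD_eq]; exact replace_eq_rep l tD (by simp [tD])
  induction ls generalizing t res with
  | nil => simp [RA]
  | cons l ls ih =>
    rw [List.foldl_cons, ih]
    rw [Prod.mk.injEq]
    constructor
    · simp only [hI, hD, List.map_cons, List.sum_cons, dA]; ring
    · simp only [hI, hD, hRI, hRD, RA]
      simp [pvPiece, tA, dA, add_sub_assoc]

lemma A_char (code : String) :
    convert_to_normal code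
      = String.ofList (RA 0 ((spl code.toList).1 :: (spl code.toList).2)) := by
  unfold convert_to_normal
  rw [tE_eq, splitOn_eq_spl]
  simp only [A_loop]
  simp

-- ---- token-skip facts (each token starts with an opening angle bracket, ends with a closing one and has none inside, so tokens never overlap) ----
lemma cnt_tD_tIcons (r : List Char) :
    cnt tD ('<'::'I'::'N'::'D'::'E'::'N'::'T'::'>'::r) = cnt tD r := by
  simp [tD, cnt, List.isPrefixOf]

lemma cnt_tI_tDcons (r : List Char) :
    cnt tI ('<'::'D'::'E'::'D'::'E'::'N'::'T'::'>'::r) = cnt tI r := by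
  simp [tI, cnt, List.isPrefixOf]

lemma cnt_tI_tIcons (r : List Char) :
    cnt tI ('<'::'I'::'N'::'D'::'E'::'N'::'T'::'>'::r) = 1 + cnt tI r := by
  simp [tI, cnt, List.isPrefixOf]

lemma cnt_tD_tDcons (r : List Char) :
    cnt tD ('<'::'D'::'E'::'D'::'E'::'N'::'T'::'>'::r) = 1 + cnt tD r := by
  simp [tD, cnt, List.isPrefixOf]

lemma cnt_tD_tail (r : List Char) :
    cnt tD ('D'::'E'::'D'::'E'::'N'::'T'::'>'::r) = cnt tD r := by
  simp [tD, cnt, List.isPrefixOf]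

lemma rep_tI_tIcons (r : List Char) :
    rep tI ('<'::'I'::'N'::'D'::'E'::'N'::'T'::'>'::r) = rep tI r := by
  simp [tI, rep, List.isPrefixOf]

lemma rep_tI_tDcons (r : List Char) :
    rep tI ('<'::'D'::'E'::'D'::'E'::'N'::'T'::'>'::r)
      = '<'::'D'::'E'::'D'::'E'::'N'::'T'::'>':: rep tI r := by
  simp [tI, rep, List.isPrefixOf]

lemma rep_tD_tDcons (r : List Char) :
    rep tD ('<'::'D'::'E'::'D'::'E'::'N'::'T'::'>'::r) = rep tD r := by
  simp [tD, rep, List.isPrefixOf]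

lemma dB_tIcons (r : List Char) :
    dB ('<'::'I'::'N'::'D'::'E'::'N'::'T'::'>'::r) = dB r + 1 := by
  simp [tI, dB, List.isPrefixOf]

lemma dB_tDcons (r : List Char) :
    dB ('<'::'D'::'E'::'D'::'E'::'N'::'T'::'>'::r) = dB r - 1 := by
  simp [tI, tD, dB, List.isPrefixOf]

lemma tB_tIcons (r : List Char) :
    tB ('<'::'I'::'N'::'D'::'E'::'N'::'T'::'>'::r) = tB r := by
  simp [tI, tB, List.isPrefixOf]

lemma tB_tDcons (r : List Char) :
    tB ('<'::'D'::'E'::'D'::'E'::'N'::'T'::'>'::r) = tB r := by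
  simp [tI, tD, tB, List.isPrefixOf]

lemma spl_tIcons (r : List Char) :
    spl ('<'::'I'::'N'::'D'::'E'::'N'::'T'::'>'::r)
      = ('<'::'I'::'N'::'D'::'E'::'N'::'T'::'>':: (spl r).1, (spl r).2) := by
  simp [tE, spl, List.isPrefixOf]

lemma spl_tDcons (r : List Char) :
    spl ('<'::'D'::'E'::'D'::'E'::'N'::'T'::'>'::r)
      = ('<'::'D'::'E'::'D'::'E'::'N'::'T'::'>':: (spl r).1, (spl r).2) := by
  simp [tE, spl, List.isPrefixOf]

lemma spl_char (c : Char) (t : List Char) (h : ¬ tE.isPrefixOf (c :: t)) :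
    spl (c :: t) = (c :: (spl t).1, (spl t).2) := by
  rw [spl]; simp [h]

lemma spl_fst_prefix (l : List Char) : (spl l).1 <+: l := by
  induction l using spl.induct with
  | case1 => simp [spl]
  | case2 c t h ih => rw [spl, if_pos h]; exact (List.nil_prefix)
  | case3 c t h ih => rw [spl, if_neg h]; exact (List.cons_prefix_cons).mpr ⟨rfl, ih⟩

-- ---- characterisation of B ----
lemma loopB_char :
    ∀ (s : List Char) (ind d : Int) (buf out : List Char),
      pvLoopB s ind d buf out
        = out ++ pvPiece (ind + d + dB (spl s).1) (buf ++ tB (spl s).1)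
            ++ RB (ind + d + dB (spl s).1) (spl s).2 := by
  intro s ind d buf out
  induction s, ind, d, buf, out using pvLoopB.induct with
  | case1 ind d buf out =>
    rw [pvLoopB]
    simp [spl, dB, tB, RB]
  | case2 c t ind d buf out h1 ih =>
    have hp : tE.isPrefixOf (c :: t) = true := h1
    rw [pvLoopB, if_pos h1, ih, spl, if_pos hp]
    simp [dB, tB, RB, List.append_assoc]
  | case3 c t ind d buf out h1 h2 ih =>
    have hp : tI.isPrefixOf (c :: t) = true := h2
    obtain ⟨r, hr⟩ := List.isPrefixOf_iff_prefix.mp hp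
    obtain ⟨hc, ht⟩ : '<' = c ∧ 'I'::'N'::'D'::'E'::'N'::'T'::'>'::r = t := by
      simpa [tI] using hr
    subst hc; subst ht
    rw [pvLoopB, if_neg h1, if_pos h2, ih]
    simp only [List.drop_succ_cons, List.drop_zero]
    rw [spl_tIcons, dB_tIcons, tB_tIcons]
    have harith : ∀ x : Int, ind + (d + 1) + x = ind + d + (x + 1) := by intro x; ring
    simp [harith]
  | case4 c t ind d buf out h1 h2 h3 ih =>
    have hp : tD.isPrefixOf (c :: t) = true := h3
    obtain ⟨r, hr⟩ := List.isPrefixOf_iff_prefix.mp hp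
    obtain ⟨hc, ht⟩ : '<' = c ∧ 'D'::'E'::'D'::'E'::'N'::'T'::'>'::r = t := by
      simpa [tD] using hr
    subst hc; subst ht
    rw [pvLoopB, if_neg h1, if_neg h2, if_pos h3, ih]
    simp only [List.drop_succ_cons, List.drop_zero]
    rw [spl_tDcons, dB_tDcons, tB_tDcons]
    have harith : ∀ x : Int, ind + (d - 1) + x = ind + d + (x - 1) := by intro x; ring
    simp [harith]
  | case5 c t ind d buf out h1 h2 h3 ih =>
    have hE' : ¬ tE.isPrefixOf (c :: t) = true := h1
    rw [pvLoopB, if_neg h1, if_neg h2, if_neg h3, ih, spl_char c t hE']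
    have hpre : (spl t).1 <+: t := spl_fst_prefix t
    have hI' : ¬ tI.isPrefixOf (c :: (spl t).1) = true := by
      intro h
      exact h2 (List.isPrefixOf_iff_prefix.mpr
        ((List.isPrefixOf_iff_prefix.mp h).trans ((List.prefix_cons_inj c).mpr hpre)))
    have hD' : ¬ tD.isPrefixOf (c :: (spl t).1) = true := by
      intro h
      exact h3 (List.isPrefixOf_iff_prefix.mpr
        ((List.isPrefixOf_iff_prefix.mp h).trans ((List.prefix_cons_inj c).mpr hpre)))
    rw [dB, if_neg hI', if_neg hD', tB, if_neg hI', if_neg hD']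
    simp [List.append_assoc]

lemma B_char (code : String) :
    convert_to_normal_alt code
      = String.ofList (RB 0 ((spl code.toList).1 :: (spl code.toList).2)) := by
  unfold convert_to_normal_alt
  rw [loopB_char]
  simp [RB]

-- ---- per-line agreement ----
lemma dB_eq (l : List Char) : dB l = dA l := by
  induction l using dB.induct with
  | case1 => simp [dB, dA, cnt]
  | case2 c t h2 ih =>
    obtain ⟨r, hr⟩ := List.isPrefixOf_iff_prefix.mp h2
    obtain ⟨hc, ht⟩ : '<' = c ∧ 'I'::'N'::'D'::'E'::'N'::'T'::'>'::r = t := by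
      simpa [tI] using hr
    subst hc; subst ht
    simp only [List.drop_succ_cons, List.drop_zero] at ih
    rw [dB_tIcons, ih]
    unfold dA
    rw [cnt_tI_tIcons, cnt_tD_tIcons]
    push_cast; ring
  | case3 c t h2 h3 ih =>
    obtain ⟨r, hr⟩ := List.isPrefixOf_iff_prefix.mp h3
    obtain ⟨hc, ht⟩ : '<' = c ∧ 'D'::'E'::'D'::'E'::'N'::'T'::'>'::r = t := by
      simpa [tD] using hr
    subst hc; subst ht
    simp only [List.drop_succ_cons, List.drop_zero] at ih
    rw [dB_tDcons, ih]
    unfold dA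
    rw [cnt_tI_tDcons, cnt_tD_tDcons]
    push_cast; ring
  | case4 c t h2 h3 ih =>
    rw [dB, if_neg h2, if_neg h3, ih]
    unfold dA
    rw [show cnt tI (c :: t) = cnt tI t from by rw [cnt, if_neg h2],
        show cnt tD (c :: t) = cnt tD t from by rw [cnt, if_neg h3]]

lemma cnt_mono (l : List Char) : cnt tD l ≤ cnt tD (rep tI l) := by
  induction l using dB.induct with
  | case1 => simp [cnt, rep]
  | case2 c t h2 ih =>
    obtain ⟨r, hr⟩ := List.isPrefixOf_iff_prefix.mp h2
    obtain ⟨hc, ht⟩ : '<' = c ∧ 'I'::'N'::'D'::'E'::'N'::'T'::'>'::r = t := by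
      simpa [tI] using hr
    subst hc; subst ht
    simp only [List.drop_succ_cons, List.drop_zero] at ih
    rw [cnt_tD_tIcons, rep_tI_tIcons]
    exact ih
  | case3 c t h2 h3 ih =>
    obtain ⟨r, hr⟩ := List.isPrefixOf_iff_prefix.mp h3
    obtain ⟨hc, ht⟩ : '<' = c ∧ 'D'::'E'::'D'::'E'::'N'::'T'::'>'::r = t := by
      simpa [tD] using hr
    subst hc; subst ht
    simp only [List.drop_succ_cons, List.drop_zero] at ih
    rw [cnt_tD_tDcons, rep_tI_tDcons, cnt_tD_tDcons]
    omega
  | case4 c t h2 h3 ih =>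
    rw [show cnt tD (c :: t) = cnt tD t from by rw [cnt, if_neg h3],
        show rep tI (c :: t) = c :: rep tI t from by rw [rep, if_neg h2]]
    by_cases hq : tD.isPrefixOf (c :: rep tI t) = true
    · obtain ⟨y, hy⟩ := List.isPrefixOf_iff_prefix.mp hq
      obtain ⟨hc, hy2⟩ : '<' = c ∧ 'D'::'E'::'D'::'E'::'N'::'T'::'>'::y = rep tI t := by
        simpa [tD] using hy
      have h1 : cnt tD (rep tI t) = cnt tD y := by rw [← hy2, cnt_tD_tail]
      rw [cnt, if_pos hq]
      have hdrop : (rep tI t).drop (tD.length - 1) = y := by rw [← hy2]; simp [tD]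
      rw [hdrop]
      omega
    · rw [cnt, if_neg hq]
      exact ih

lemma tB_eq (l : List Char) (h : OKl l) : tB l = tA l := by
  revert h
  induction l using tB.induct with
  | case1 => intro _; simp [tB, tA, rep]
  | case2 c t h2 ih =>
    obtain ⟨r, hr⟩ := List.isPrefixOf_iff_prefix.mp h2
    obtain ⟨hc, ht⟩ : '<' = c ∧ 'I'::'N'::'D'::'E'::'N'::'T'::'>'::r = t := by
      simpa [tI] using hr
    subst hc; subst ht
    simp only [List.drop_succ_cons, List.drop_zero] at ih
    intro h
    unfold OKl at h
    rw [rep_tI_tIcons, cnt_tD_tIcons] at h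
    rw [tB_tIcons, ih h]
    unfold tA
    rw [rep_tI_tIcons]
  | case3 c t h2 h3 ih =>
    obtain ⟨r, hr⟩ := List.isPrefixOf_iff_prefix.mp h3
    obtain ⟨hc, ht⟩ : '<' = c ∧ 'D'::'E'::'D'::'E'::'N'::'T'::'>'::r = t := by
      simpa [tD] using hr
    subst hc; subst ht
    simp only [List.drop_succ_cons, List.drop_zero] at ih
    intro h
    unfold OKl at h
    rw [rep_tI_tDcons, cnt_tD_tDcons, cnt_tD_tDcons] at h
    rw [tB_tDcons, ih (show OKl r by unfold OKl; omega)]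
    unfold tA
    rw [rep_tI_tDcons, rep_tD_tDcons]
  | case4 c t h2 h3 ih =>
    intro h
    unfold OKl at h
    have hrep : rep tI (c :: t) = c :: rep tI t := by rw [rep, if_neg h2]
    have hct : cnt tD (c :: t) = cnt tD t := by rw [cnt, if_neg h3]
    rw [hrep, hct] at h
    have hq : ¬ tD.isPrefixOf (c :: rep tI t) = true := by
      intro hq
      obtain ⟨y, hy⟩ := List.isPrefixOf_iff_prefix.mp hq
      obtain ⟨hc, hy2⟩ : '<' = c ∧ 'D'::'E'::'D'::'E'::'N'::'T'::'>'::y = rep tI t := by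
        simpa [tD] using hy
      have h1 : cnt tD (rep tI t) = cnt tD y := by rw [← hy2, cnt_tD_tail]
      have h2' : cnt tD (c :: rep tI t) = 1 + cnt tD y := by
        rw [cnt, if_pos hq]
        congr 1
        rw [show (rep tI t).drop (tD.length - 1) = y from by rw [← hy2]; simp [tD]]
      have hm := cnt_mono t
      omega
    have h' : OKl t := by
      unfold OKl
      rw [show cnt tD (c :: rep tI t) = cnt tD (rep tI t) from by rw [cnt, if_neg hq]] at h
      exact h
    rw [show tB (c :: t) = c :: tB t from by rw [tB, if_neg h2, if_neg h3], ih h']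
    unfold tA
    rw [hrep, show rep tD (c :: rep tI t) = c :: rep tD (rep tI t) from by rw [rep, if_neg hq]]

lemma RAB (ls : List (List Char)) : ∀ t, (∀ l ∈ ls, OKl l) → RA t ls = RB t ls := by
  induction ls with
  | nil => intro t _; rw [RA, RB]
  | cons l ls ih =>
    intro t h
    rw [RA, RB, dB_eq, tB_eq l (h l List.mem_cons_self),
        ih _ (fun x hx => h x (List.mem_cons_of_mem l hx))]

-- ---- length facts for the tight claim ----
lemma len_rep (sub : List Char) (hs : sub ≠ []) :
    ∀ l, l.length = (rep sub l).length + sub.length * cnt sub l := by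
  obtain ⟨a, s, hsub⟩ := List.exists_cons_of_ne_nil hs
  subst hsub
  suffices H : ∀ n l, l.length ≤ n →
      l.length = (rep (a :: s) l).length + (a :: s).length * cnt (a :: s) l by
    exact fun l => H l.length l le_rfl
  intro n
  induction n with
  | zero =>
    intro l h
    have hl : l = [] := List.eq_nil_of_length_eq_zero (Nat.le_zero.mp h)
    subst hl
    simp [rep, cnt]
  | succ n ih =>
    intro l h
    cases l with
    | nil => simp [rep, cnt]
    | cons c t =>
      rw [rep, cnt]
      by_cases hp : (a :: s).isPrefixOf (c :: t)
      · rw [if_pos hp, if_pos hp]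
        obtain ⟨r, hr⟩ := List.isPrefixOf_iff_prefix.mp hp
        rw [List.cons_append] at hr
        injection hr with h1 h2
        have hdrop : t.drop ((a :: s).length - 1) = r := by
          rw [show (a :: s).length - 1 = s.length from by simp, ← h2, List.drop_left]
        rw [hdrop]
        have hr' := ih r (by
          have : t.length = s.length + r.length := by rw [← h2]; simp
          simp at h; omega)
        have hlen : t.length = s.length + r.length := by rw [← h2]; simp
        have hmul : (a :: s).length * (1 + cnt (a :: s) r)
            = (a :: s).length + (a :: s).length * cnt (a :: s) r := by ring
        simp only [List.length_cons] at *
        omega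
      · rw [if_neg hp, if_neg hp]
        have ht := ih t (by simp at h; omega)
        simp only [List.length_cons] at *
        omega

lemma len_tB (l : List Char) :
    l.length = (tB l).length + 8 * cnt tI l + 8 * cnt tD l := by
  induction l using tB.induct with
  | case1 => simp [tB, cnt]
  | case2 c t h2 ih =>
    obtain ⟨r, hr⟩ := List.isPrefixOf_iff_prefix.mp h2
    obtain ⟨hc, ht⟩ : '<' = c ∧ 'I'::'N'::'D'::'E'::'N'::'T'::'>'::r = t := by
      simpa [tI] using hr
    subst hc; subst ht
    simp only [List.drop_succ_cons, List.drop_zero] at ih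
    rw [tB_tIcons, cnt_tI_tIcons, cnt_tD_tIcons]
    simp only [List.length_cons]
    omega
  | case3 c t h2 h3 ih =>
    obtain ⟨r, hr⟩ := List.isPrefixOf_iff_prefix.mp h3
    obtain ⟨hc, ht⟩ : '<' = c ∧ 'D'::'E'::'D'::'E'::'N'::'T'::'>'::r = t := by
      simpa [tD] using hr
    subst hc; subst ht
    simp only [List.drop_succ_cons, List.drop_zero] at ih
    rw [tB_tDcons, cnt_tI_tDcons, cnt_tD_tDcons]
    simp only [List.length_cons]
    omega
  | case4 c t h2 h3 ih =>
    rw [show tB (c :: t) = c :: tB t from by rw [tB, if_neg h2, if_neg h3],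
        show cnt tI (c :: t) = cnt tI t from by rw [cnt, if_neg h2],
        show cnt tD (c :: t) = cnt tD t from by rw [cnt, if_neg h3]]
    simp only [List.length_cons]
    omega

lemma len_line (l : List Char) :
    (tA l).length ≤ (tB l).length ∧ (¬ OKl l → (tA l).length < (tB l).length) := by
  have e1 := len_rep tI (by simp [tI]) l
  have e2 := len_rep tD (by simp [tD]) (rep tI l)
  have e3 := len_tB l
  have e4 := cnt_mono l
  have h8I : tI.length = 8 := rfl
  have h8D : tD.length = 8 := rfl
  rw [h8I] at e1
  rw [h8D] at e2
  unfold tA OKl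
  constructor
  · omega
  · intro h
    have : cnt tD (rep tI l) ≠ cnt tD l := h
    omega

lemma len_RA_RB (ls : List (List Char)) :
    ∀ t, (RA t ls).length ≤ (RB t ls).length
      ∧ ((∃ l ∈ ls, ¬ OKl l) → (RA t ls).length < (RB t ls).length) := by
  induction ls with
  | nil => intro t; simp [RA, RB]
  | cons l ls ih =>
    intro t
    have hline := len_line l
    have ihl := ih (t + dA l)
    rw [RA, RB, dB_eq]
    simp only [pvPiece, List.length_append, List.length_cons, List.length_replicate]
    constructor
    · omega
    · rintro ⟨x, hx, hnx⟩
      rcases List.mem_cons.mp hx with rfl | hx'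
      · have := hline.2 hnx
        omega
      · have := ihl.2 ⟨x, hx', hnx⟩
        omega

-- ===== VERDICT (by name: the statements are the Claim_ definitions above) =====
theorem convert_to_normal_spec : Claim_unchanged_convert_to_normal := by
  intro code _
  unfold Spec_convert_to_normal
  intro hnd
  unfold D_convert_to_normal at hnd
  push Not at hnd
  rw [tE_eq, splitOn_eq_spl] at hnd
  rw [A_char, B_char]
  apply congrArg
  apply RAB
  intro l hl
  have h := hnd l hl
  rw [tI_eq, tD_eq, replace_eq_rep _ tI (by simp [tI]),
      count_eq_cnt _ tD (by simp [tD]), count_eq_cnt _ tD (by simp [tD])] at h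
  exact h

theorem convert_to_normal_changed : Claim_changed_convert_to_normal := by
  unfold Claim_changed_convert_to_normal
  refine ⟨by decide, by decide, by decide, ?_, by decide⟩
  show convert_to_normal_alt "<DED<INDENT>ENT>" = "\n    <DEDENT>"
  unfold convert_to_normal_alt
  rw [show ("<DED<INDENT>ENT>" : String).toList
        = ['<','D','E','D','<','I','N','D','E','N','T','>','E','N','T','>'] from rfl]
  simp [pvLoopB, pvPiece, PySem.Chars.startswith, tE_eq, tI_eq, tD_eq, tE, tI, tD,
        List.isPrefixOf]

theorem convert_to_normal_tight : Claim_exact_convert_to_normal := by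
  intro code _ hd heq
  unfold D_convert_to_normal at hd
  rw [tE_eq, splitOn_eq_spl] at hd
  obtain ⟨l, hl, hne⟩ := hd
  rw [tI_eq, tD_eq, replace_eq_rep _ tI (by simp [tI]),
      count_eq_cnt _ tD (by simp [tD]), count_eq_cnt _ tD (by simp [tD])] at hne
  rw [A_char, B_char] at heq
  have hlist := congrArg String.toList heq
  rw [String.toList_ofList, String.toList_ofList] at hlist
  have hlen := congrArg List.length hlist
  have hstrict := (len_RA_RB ((spl code.toList).1 :: (spl code.toList).2) 0).2 ⟨l, hl, hne⟩
  omega
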